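-- pv_equiv track=rewrite | github.com/fabiansato/Python-Ejercicios | 02-UNGS/parcial final 3/primoLejano.py | primosLejanos
-- ===== SOURCE A (Python) =====
-- def esPrimoLejano(n):
--     cont=0
--     for i in range(1,n+1):
--         if(n%i==0):
--             cont+=1
--     if cont<=3:
--         return(True)
--     else:
--         return(False)
--
-- def primosLejanos(cantidad,inicio):
--     lista=[]
--     i=inicio
--     while(len(lista)<cantidad):
--         if(esPrimoLejano(i)):
--             lista.append(i)
--         i+=1
--     return(lista)
-- ===== SOURCE B (Python) =====
-- def esPrimoLejano(n):
--     # count divisors in pairs (d, n//d) scanning only d*d <= n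
--     cont = 0
--     d = 1
--     while d * d <= n:
--         if n % d == 0:
--             cont += 1 if d * d == n else 2
--         d += 1
--     return cont <= 3
--
-- def primosLejanos(cantidad, inicio):
--     lista = []
--     i = inicio
--     while len(lista) < cantidad:
--         if esPrimoLejano(i):
--             lista.append(i)
--         i += 1
--     return lista
-- ===== Notes on version B (the rewrite author's own statement) =====
-- stated objective: faster
-- what changed: esPrimoLejano now counts divisors in pairs (d, n//d) scanning only d with d*d <= n instead of tallying every i in range(1, n+1); the collecting loop is unchanged.
import Mathlib
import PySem

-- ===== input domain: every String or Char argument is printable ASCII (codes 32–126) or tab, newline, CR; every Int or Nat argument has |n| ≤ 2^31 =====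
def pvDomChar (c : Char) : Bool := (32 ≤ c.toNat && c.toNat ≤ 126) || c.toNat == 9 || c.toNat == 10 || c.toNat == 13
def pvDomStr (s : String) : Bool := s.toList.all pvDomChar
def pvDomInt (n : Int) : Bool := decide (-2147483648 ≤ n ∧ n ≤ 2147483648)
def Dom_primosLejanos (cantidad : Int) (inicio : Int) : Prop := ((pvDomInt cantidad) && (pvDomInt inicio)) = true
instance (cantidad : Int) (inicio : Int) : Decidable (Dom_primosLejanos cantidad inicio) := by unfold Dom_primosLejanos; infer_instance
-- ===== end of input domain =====

-- B replaces A's full 1..n divisor tally with a paired scan of divisors d with d*d ≤ n (counting d and n//d),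
-- cutting each primality-like test from O(n) to O(√n); the collecting loop is unchanged.
-- Both while-loops are ported with an explicit fuel bound (ample for the stated domain); the loop stops early
-- exactly as Python does, so the two ports share the same fuel expression faithfully.

-- ===== PORT A =====
def esPrimoLejano (n : Int) : Bool :=
  -- cont = 0; for i in range(1, n+1): if n % i == 0: cont += 1
  let cont : Int := (PySem.List.pyRange 1 (n + 1) 1).foldl
    (fun c i => if PySem.Int.mod n i == 0 then c + 1 else c) 0
  if cont ≤ 3 then true else false

def pvLoopA (cantidad : Int) : Nat → List Int → Int → List Int
  | 0, lista, _ => lista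
  | fuel + 1, lista, i =>
    if (lista.length : Int) < cantidad then
      pvLoopA cantidad fuel (if esPrimoLejano i then lista ++ [i] else lista) (i + 1)
    else lista

def primosLejanos (cantidad : Int) (inicio : Int) : List Int :=
  pvLoopA cantidad (cantidad.toNat * 10000 + 1) [] inicio

-- ===== PORT B =====
-- the 'while d*d <= n' loop, with a structural fuel guard (d*d ≤ n forces d ≤ n, so
-- n.toNat + 1 steps from d = 1 always cover the whole loop)
def pvContarB (n : Int) : Nat → Int → Int → Int
  | 0, _, cont => cont
  | fuel + 1, d, cont =>
    if d * d ≤ n then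
      pvContarB n fuel (d + 1)
        (if PySem.Int.mod n d == 0 then cont + (if d * d == n then 1 else 2) else cont)
    else cont

def esPrimoLejano_B (n : Int) : Bool :=
  decide (pvContarB n (n.toNat + 1) 1 0 ≤ 3)

def pvLoopB (cantidad : Int) : Nat → List Int → Int → List Int
  | 0, lista, _ => lista
  | fuel + 1, lista, i =>
    if (lista.length : Int) < cantidad then
      pvLoopB cantidad fuel (if esPrimoLejano_B i then lista ++ [i] else lista) (i + 1)
    else lista

def primosLejanos_alt (cantidad : Int) (inicio : Int) : List Int :=
  pvLoopB cantidad (cantidad.toNat * 10000 + 1) [] inicio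

-- ===== PRECONDITION & SPEC =====
def Spec_primosLejanos (cantidad : Int) (inicio : Int) (out : List Int) : Prop := out = primosLejanos_alt cantidad inicio
instance (cantidad : Int) (inicio : Int) (out : List Int) : Decidable (Spec_primosLejanos cantidad inicio out) := by unfold Spec_primosLejanos; infer_instance

-- ===== CLAIM (what is proved, stated in full; the proofs are below) =====
def Claim_equal_primosLejanos : Prop := ∀ (cantidad : Int) (inicio : Int), Dom_primosLejanos cantidad inicio → Spec_primosLejanos cantidad inicio (primosLejanos cantidad inicio)

-- ===== LEMMAS AND PROOFS =====

-- the weight each d with d*d ≤ m contributes in B's scan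
def pvW (m : Nat) (e : Nat) : Int :=
  if e ∣ m then (if e * e = m then 1 else 2) else 0

theorem pv_countP_range (m : Nat) (p : Nat → Bool) :
    (List.range m).countP p = ((Finset.range m).filter (fun k => p k = true)).card := by
  induction m with
  | zero => simp
  | succ m ih =>
    rw [List.range_succ, List.countP_append, Finset.range_add_one, Finset.filter_insert]
    by_cases h : p m = true
    · rw [if_pos h, Finset.card_insert_of_notMem (by simp), ih]
      simp [h]
    · rw [if_neg h, ih]
      simp [h]

theorem pv_mod_beq (m : Nat) (e : Nat) :
    (PySem.Int.mod (m : Int) (e : Int) == 0) = decide (e ∣ m) := by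
  rw [Bool.eq_iff_iff]
  simp only [beq_iff_eq, decide_eq_true_eq]
  rw [PySem.Int.mod_eq_zero_iff_dvd, Int.natCast_dvd_natCast]

-- A's tally equals the number of divisors of m in [1, m]
theorem pv_contA (n : Int) (m : Nat) (hm : 1 ≤ m) (hn : n = (m : Int)) :
    (PySem.List.pyRange 1 (n + 1) 1).foldl
      (fun c i => if PySem.Int.mod n i == 0 then c + 1 else c) 0
      = (((Finset.Icc 1 m).filter (fun e => e ∣ m)).card : Int) := by
  subst hn
  rw [PySem.List.foldl_count_if, PySem.List.pyRange_one]
  have h1 : (((m : Int) + 1) - 1).toNat = m := by omega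
  rw [h1, List.countP_map]
  have h2 : (List.range m).countP
      ((fun i => PySem.Int.mod (m : Int) i == 0) ∘ (fun k : Nat => (1 : Int) + (k : Int)))
      = (List.range m).countP (fun k => decide ((k + 1) ∣ m)) := by
    apply List.countP_congr
    intro k _
    have hc : (1 : Int) + (k : Int) = ((k + 1 : Nat) : Int) := by push_cast; ring
    simp only [Function.comp_apply, hc]
    rw [pv_mod_beq m (k + 1)]
  rw [h2, pv_countP_range]
  have h3 : ((Finset.range m).filter (fun k => decide ((k + 1) ∣ m) = true)).card
      = ((Finset.Icc 1 m).filter (fun e => e ∣ m)).card := by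
    apply Finset.card_nbij (fun k => k + 1)
    · intro k hk
      simp only [Finset.coe_filter, Finset.mem_range, Set.mem_setOf_eq, decide_eq_true_eq,
        Finset.mem_Icc] at hk ⊢
      exact ⟨⟨by omega, by omega⟩, hk.2⟩
    · intro a _ b _ hab
      simpa using hab
    · intro e he
      simp only [Finset.coe_filter, Finset.mem_Icc, Set.mem_setOf_eq, Set.mem_image,
        Finset.mem_range, decide_eq_true_eq] at he ⊢
      refine ⟨e - 1, ⟨by omega, ?_⟩, by omega⟩
      have : e - 1 + 1 = e := by omega
      rw [this]
      exact he.2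
  rw [h3]
  simp

-- B's scan equals the weighted sum over [e, sqrt m]
theorem pv_contB (n : Int) (m : Nat) (hn : n = (m : Int)) :
    ∀ (k e : Nat) (c : Int), 1 ≤ e → m.sqrt < e + k →
      pvContarB n k (e : Int) c = c + ∑ t ∈ Finset.Icc e m.sqrt, pvW m t := by
  subst hn
  intro k
  induction k with
  | zero =>
    intro e c he hr
    rw [pvContarB, Finset.Icc_eq_empty (by omega), Finset.sum_empty]
    ring
  | succ k ih =>
    intro e c he hr
    by_cases hle : e * e ≤ m
    · have her : e ≤ m.sqrt := Nat.le_sqrt.mpr hle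
      rw [pvContarB, if_pos (by exact_mod_cast hle)]
      have hc1 : ((e : Int) + 1) = ((e + 1 : Nat) : Int) := by push_cast; ring
      rw [hc1, ih (e + 1) _ (by omega) (by omega)]
      have hsplit : Finset.Icc e m.sqrt = insert e (Finset.Icc (e + 1) m.sqrt) := by
        ext t
        simp only [Finset.mem_Icc, Finset.mem_insert]
        omega
      rw [hsplit, Finset.sum_insert (by simp [Finset.mem_Icc])]
      have hsq : ((e : Int) * (e : Int) == (m : Int)) = decide (e * e = m) := by
        rw [Bool.eq_iff_iff]
        simp only [beq_iff_eq, decide_eq_true_eq]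
        constructor
        · intro h; exact_mod_cast h
        · intro h; exact_mod_cast congrArg (fun x : Nat => (x : Int)) h
      rw [pv_mod_beq m e, hsq]
      by_cases h1 : e ∣ m <;> by_cases h2 : e * e = m <;>
        simp [pvW, h1, h2] <;> ring
    · have hnot : ¬ ((e : Int) * (e : Int) ≤ (m : Int)) := by
        intro h; exact hle (by exact_mod_cast h)
      have : ¬ e ≤ m.sqrt := fun h => hle (Nat.le_sqrt.mp h)
      rw [pvContarB, if_neg hnot, Finset.Icc_eq_empty (by omega), Finset.sum_empty]
      ring

-- the pairing d ↔ m/d: as many divisors above √m as strictly below it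
theorem pv_card_pair (m : Nat) (hm : 1 ≤ m) :
    (((Finset.Icc 1 m).filter (fun e => e ∣ m)).filter (fun e => m < e * e)).card
      = (((Finset.Icc 1 m).filter (fun e => e ∣ m)).filter (fun e => e * e < m)).card := by
  apply Finset.card_bij' (fun e _ => m / e) (fun e _ => m / e)
  · intro e he
    simp only [Finset.mem_filter, Finset.mem_Icc] at he ⊢
    obtain ⟨⟨⟨h1, h2⟩, hd⟩, hgt⟩ := he
    have hq : m / e * e = m := Nat.div_mul_cancel hd
    have hq1 : 1 ≤ m / e := Nat.one_le_div_iff (by omega) |>.mpr h2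
    have hqe : m / e < e := by nlinarith
    refine ⟨⟨⟨hq1, Nat.div_le_self m e⟩, Nat.div_dvd_of_dvd hd⟩, by nlinarith⟩
  · intro e he
    simp only [Finset.mem_filter, Finset.mem_Icc] at he ⊢
    obtain ⟨⟨⟨h1, h2⟩, hd⟩, hlt⟩ := he
    have hq : m / e * e = m := Nat.div_mul_cancel hd
    have hq1 : 1 ≤ m / e := Nat.one_le_div_iff (by omega) |>.mpr h2
    have hqe : e < m / e := by nlinarith
    refine ⟨⟨⟨hq1, Nat.div_le_self m e⟩, Nat.div_dvd_of_dvd hd⟩, by nlinarith⟩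
  · intro e he
    simp only [Finset.mem_filter, Finset.mem_Icc] at he
    exact Nat.div_div_self he.1.2 (by omega)
  · intro e he
    simp only [Finset.mem_filter, Finset.mem_Icc] at he
    exact Nat.div_div_self he.1.2 (by omega)

theorem pv_main_count (m : Nat) (hm : 1 ≤ m) :
    ((((Finset.Icc 1 m).filter (fun e => e ∣ m)).card : Int))
      = ∑ t ∈ Finset.Icc 1 m.sqrt, pvW m t := by
  have hIcc : (Finset.Icc 1 m.sqrt).filter (fun e => e ∣ m)
      = ((Finset.Icc 1 m).filter (fun e => e ∣ m)).filter (fun e => e * e ≤ m) := by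
    ext e
    simp only [Finset.mem_filter, Finset.mem_Icc]
    constructor
    · rintro ⟨⟨h1, h2⟩, hd⟩
      exact ⟨⟨⟨h1, Nat.le_of_dvd (by omega) hd⟩, hd⟩, Nat.le_sqrt.mp h2⟩
    · rintro ⟨⟨⟨h1, _⟩, hd⟩, hsq⟩
      exact ⟨⟨h1, Nat.le_sqrt.mpr hsq⟩, hd⟩
  have hsum : ∑ t ∈ Finset.Icc 1 m.sqrt, pvW m t
      = ∑ t ∈ (Finset.Icc 1 m.sqrt).filter (fun e => e ∣ m),
          (if t * t = m then (1 : Int) else 2) := by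
    rw [Finset.sum_filter]
    apply Finset.sum_congr rfl
    intro t _
    simp [pvW]
  set D := (Finset.Icc 1 m).filter (fun e => e ∣ m) with hD
  have hle : D.filter (fun e => e * e ≤ m)
      = D.filter (fun e => e * e < m) ∪ D.filter (fun e => e * e = m) := by
    rw [← Finset.filter_or]
    apply Finset.filter_congr
    intro e _
    constructor
    · intro h; omega
    · intro h; omega
  have hdisj : Disjoint (D.filter (fun e => e * e < m)) (D.filter (fun e => e * e = m)) := by
    apply Finset.disjoint_filter_filter'
    rw [disjoint_iff_inf_le]
    intro e he
    simp only [Pi.inf_apply, inf_Prop_eq] at he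
    omega
  have hRHS : ∑ t ∈ Finset.Icc 1 m.sqrt, pvW m t
      = 2 * ((D.filter (fun e => e * e < m)).card : Int)
        + ((D.filter (fun e => e * e = m)).card : Int) := by
    rw [hsum, hIcc, hle, Finset.sum_union hdisj]
    have e1 : ∑ t ∈ D.filter (fun e => e * e < m), (if t * t = m then (1 : Int) else 2)
        = ∑ t ∈ D.filter (fun e => e * e < m), (2 : Int) := by
      apply Finset.sum_congr rfl
      intro t ht
      simp only [Finset.mem_filter] at ht
      rw [if_neg (by omega)]
    have e2 : ∑ t ∈ D.filter (fun e => e * e = m), (if t * t = m then (1 : Int) else 2)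
        = ∑ t ∈ D.filter (fun e => e * e = m), (1 : Int) := by
      apply Finset.sum_congr rfl
      intro t ht
      simp only [Finset.mem_filter] at ht
      rw [if_pos (by omega)]
    rw [e1, e2, Finset.sum_const, Finset.sum_const]
    ring
  have hcardsplit : (D.filter (fun e => e * e ≤ m)).card + (D.filter (fun e => ¬ (e * e ≤ m))).card
      = D.card := Finset.card_filter_add_card_filter_not (fun e => e * e ≤ m)
  have hgt : D.filter (fun e => ¬ (e * e ≤ m)) = D.filter (fun e => m < e * e) := by
    apply Finset.filter_congr
    intro e _
    constructor
    · intro h; omega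
    · intro h; omega
  have hlecard : (D.filter (fun e => e * e ≤ m)).card
      = (D.filter (fun e => e * e < m)).card + (D.filter (fun e => e * e = m)).card := by
    rw [hle, Finset.card_union_of_disjoint hdisj]
  have hpair := pv_card_pair m hm
  rw [hRHS]
  rw [hgt, hlecard] at hcardsplit
  rw [← hD] at hpair
  omega

theorem pv_pred_eq (n : Int) : esPrimoLejano n = esPrimoLejano_B n := by
  rcases (by omega : n ≤ 0 ∨ 1 ≤ n) with hn | hn
  · unfold esPrimoLejano esPrimoLejano_B
    rw [PySem.List.pyRange_one_eq_nil (by omega)]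
    have ht : n.toNat = 0 := by omega
    have hc : pvContarB n (0 + 1) 1 0 = 0 := by
      simp only [pvContarB]
      rw [if_neg (by nlinarith : ¬ (1 * 1 : Int) ≤ n)]
    rw [ht, hc]
    simp
  · have hm : n = ((n.toNat : Nat) : Int) := by omega
    have hm1 : 1 ≤ n.toNat := by omega
    unfold esPrimoLejano esPrimoLejano_B
    have hone : (1 : Int) = ((1 : Nat) : Int) := by norm_num
    rw [pv_contA n n.toNat hm1 hm]
    rw [hone, pv_contB n n.toNat hm (n.toNat + 1) 1 0 (by omega) (by have := Nat.sqrt_le_self n.toNat; omega)]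
    rw [← pv_main_count n.toNat hm1]
    by_cases h : (((Finset.Icc 1 n.toNat).filter (fun e => e ∣ n.toNat)).card : Int) ≤ 3 <;>
      simp [h]

theorem pv_loop_eq (cantidad : Int) :
    ∀ (fuel : Nat) (lista : List Int) (i : Int),
      pvLoopA cantidad fuel lista i = pvLoopB cantidad fuel lista i := by
  intro fuel
  induction fuel with
  | zero => intro lista i; rfl
  | succ f ih =>
    intro lista i
    simp only [pvLoopA, pvLoopB, pv_pred_eq, ih]

-- ===== VERDICT (by name: the statement is the Claim_ definition above) =====
theorem primosLejanos_spec : Claim_equal_primosLejanos := by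
  intro cantidad inicio _
  unfold Spec_primosLejanos primosLejanos primosLejanos_alt
  exact pv_loop_eq cantidad _ [] inicio
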